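-- pv_equiv track=rewrite | github.com/adampolak/first-fit | runs/results/gen_177/main.py | _omega_open
-- ===== SOURCE A (Python) =====
-- def _omega_open(intervals):
--     """
--     Compute omega (max intervals covering a point) via sweep.
--     Process right endpoints before left for open intervals.
--     """
--     events = []
--     for l, r in intervals:
--         if l < r:
--             events.append((l, 1))
--             events.append((r, -1))
--     events.sort(key=lambda e:(e[0], 0 if e[1]==-1 else 1))
--     cur = best = 0
--     for _, d in events:
--         cur += d
--         if cur > best:
--             best = cur
--     return best
-- ===== SOURCE B (Python) =====
-- def _omega_open(intervals):
--     """Two-pointer merge over separately sorted starts and ends (open intervals: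
--     an end at coordinate x is processed before a start at x)."""
--     starts = sorted(l for l, r in intervals if l < r)
--     ends = sorted(r for l, r in intervals if l < r)
--     best = cur = j = 0
--     for s in starts:
--         while j < len(ends) and ends[j] <= s:
--             cur -= 1
--             j += 1
--         cur += 1
--         if cur > best:
--             best = cur
--     return best
-- ===== Notes on version B (the rewrite author's own statement) =====
-- stated objective: alternative
-- what changed: Replaces the single sorted (coordinate, tag) event list and tag-keyed sweep by two independently sorted coordinate lists (starts, ends) merged on the fly with a two-pointer scan that stops once all starts are consumed.
import Mathlib
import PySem

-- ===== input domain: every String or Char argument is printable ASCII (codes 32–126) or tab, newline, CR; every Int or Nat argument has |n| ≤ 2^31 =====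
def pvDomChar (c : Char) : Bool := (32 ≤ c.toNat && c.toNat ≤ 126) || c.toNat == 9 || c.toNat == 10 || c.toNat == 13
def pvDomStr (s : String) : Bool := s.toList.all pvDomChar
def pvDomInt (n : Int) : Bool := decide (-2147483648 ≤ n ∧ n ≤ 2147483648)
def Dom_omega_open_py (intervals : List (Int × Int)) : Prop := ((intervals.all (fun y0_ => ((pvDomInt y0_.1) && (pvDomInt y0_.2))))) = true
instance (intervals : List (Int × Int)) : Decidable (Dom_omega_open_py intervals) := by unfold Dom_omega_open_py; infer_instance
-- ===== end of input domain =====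

-- B replaces A's single sorted (coordinate, tag) event list by two independently sorted
-- coordinate lists merged on the fly with a two-pointer scan (alternative decomposition,
-- same asymptotic cost). Equivalence is proved on all inputs.

-- ===== PORT A =====
def omega_open_py (intervals : List (Int × Int)) : Int :=
  let events := intervals.foldl
    (fun acc p => if p.1 < p.2 then acc ++ [(p.1, (1 : Int)), (p.2, (-1 : Int))] else acc)
    ([] : List (Int × Int))
  let ev := PySem.List.sorted2 events (fun e => e.1) (fun e => if e.2 = -1 then (0 : Int) else 1) false
  (ev.foldl (fun cb e =>
      let cur := cb.1 + e.2
      (cur, if cb.2 < cur then cur else cb.2)) ((0 : Int), (0 : Int))).2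

-- ===== PORT B =====
-- inner `while j < len(ends) and ends[j] <= s` loop: consume ends ≤ s, decrementing cur
def altDrop (s : Int) : List Int → Int → List Int × Int
  | [], cur => ([], cur)
  | e :: es, cur => if e ≤ s then altDrop s es (cur - 1) else (e :: es, cur)

-- `for s in starts` loop over the remaining starts, carrying the remaining ends
def altSweep : List Int → List Int → Int → Int → Int
  | [], _, _, best => best
  | s :: ss, es, cur, best =>
    let p := altDrop s es cur
    let cur' := p.2 + 1
    altSweep ss p.1 cur' (if best < cur' then cur' else best)

def omega_open_py_alt (intervals : List (Int × Int)) : Int :=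
  let kept := intervals.filter (fun p => p.1 < p.2)
  let starts := PySem.List.sorted (kept.map (fun p => p.1)) (fun x => x) false
  let ends := PySem.List.sorted (kept.map (fun p => p.2)) (fun x => x) false
  altSweep starts ends 0 0

-- ===== PRECONDITION & SPEC =====
def Spec_omega_open_py (intervals : List (Int × Int)) (out : Int) : Prop := out = omega_open_py_alt intervals
instance (intervals : List (Int × Int)) (out : Int) : Decidable (Spec_omega_open_py intervals out) := by unfold Spec_omega_open_py; infer_instance

-- ===== CLAIM (what is proved, stated in full; the proofs are below) =====
def Claim_equal_omega_open_py : Prop := ∀ (intervals : List (Int × Int)), Dom_omega_open_py intervals → Spec_omega_open_py intervals (omega_open_py intervals)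

-- ===== LEMMAS AND PROOFS =====

-- combined integer sort key: 2*coordinate + tag (tag 0 for an end, 1 for a start)
def evK (e : Int × Int) : Int := 2 * e.1 + (if e.2 = -1 then 0 else 1)

def evList (xs : List (Int × Int)) : List (Int × Int) :=
  (xs.filter (fun p => p.1 < p.2)).flatMap (fun p => [(p.1, (1 : Int)), (p.2, (-1 : Int))])

def mrg (ss es : List Int) : List (Int × Int) :=
  (ss.map (fun s => (s, (1 : Int)))).merge (es.map (fun e => (e, (-1 : Int))))
    (fun a b => decide (evK a ≤ evK b))

def fA (cb : Int × Int) (e : Int × Int) : Int × Int :=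
  (cb.1 + e.2, if cb.2 < cb.1 + e.2 then cb.1 + e.2 else cb.2)

lemma events_foldl_eq (xs : List (Int × Int)) (acc : List (Int × Int)) :
    xs.foldl (fun acc p => if p.1 < p.2 then acc ++ [(p.1, (1 : Int)), (p.2, (-1 : Int))] else acc) acc
      = acc ++ evList xs := by
  induction xs generalizing acc with
  | nil => simp [evList]
  | cons p t ih =>
    by_cases h : p.1 < p.2 <;> simp [evList, h, ih]

lemma before_eq :
    (fun (a b : Int × Int) => (decide (a.1 < b.1) ||
        (!decide (b.1 < a.1) && decide ((if a.2 = -1 then (0 : Int) else 1) < (if b.2 = -1 then (0 : Int) else 1)))))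
      = fun a b => decide (evK a < evK b) := by
  funext a b
  rw [Bool.eq_iff_iff]
  simp only [evK, Bool.or_eq_true, Bool.and_eq_true, Bool.not_eq_true', decide_eq_true_eq,
    decide_eq_false_iff_not]
  split_ifs <;> omega

lemma sorted2_eq_sortedK (xs : List (Int × Int)) :
    PySem.List.sorted2 xs (fun e => e.1) (fun e => if e.2 = -1 then (0 : Int) else 1) false
      = PySem.List.sorted xs evK false := by
  rw [PySem.List.sorted_eq_foldl_insertBy]
  simp only [PySem.List.sorted2]
  rw [show (if (false : Bool) = true then
        (fun a b => (decide ((fun (e : Int × Int) => e.1) b < (fun (e : Int × Int) => e.1) a) ||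
          (!decide ((fun (e : Int × Int) => e.1) a < (fun (e : Int × Int) => e.1) b) &&
            decide ((fun (e : Int × Int) => if e.2 = -1 then (0 : Int) else 1) b < (fun (e : Int × Int) => if e.2 = -1 then (0 : Int) else 1) a))))
      else (fun a b => (decide ((fun (e : Int × Int) => e.1) a < (fun (e : Int × Int) => e.1) b) ||
          (!decide ((fun (e : Int × Int) => e.1) b < (fun (e : Int × Int) => e.1) a) &&
            decide ((fun (e : Int × Int) => if e.2 = -1 then (0 : Int) else 1) a < (fun (e : Int × Int) => if e.2 = -1 then (0 : Int) else 1) b)))))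
      = fun (a b : Int × Int) => decide (evK a < evK b) from by
        simp only [if_neg (by decide : ¬ (false : Bool) = true)]; exact before_eq]

lemma flat_perm (l : List (Int × Int)) :
    (l.flatMap (fun p => [(p.1, (1 : Int)), (p.2, (-1 : Int))])).Perm
      (l.map (fun p => (p.1, (1 : Int))) ++ l.map (fun p => (p.2, (-1 : Int)))) := by
  induction l with
  | nil => simp
  | cons p t ih =>
    simp only [List.flatMap_cons, List.map_cons, List.cons_append]
    refine List.Perm.cons _ ?_
    exact (List.Perm.cons _ ih).trans List.perm_middle.symm

lemma evList_tags (xs : List (Int × Int)) : ∀ e ∈ evList xs, e.2 = 1 ∨ e.2 = -1 := by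
  intro e he
  simp only [evList, List.mem_flatMap] at he
  obtain ⟨p, _, hp⟩ := he
  simp at hp
  rcases hp with h | h <;> simp [h]

lemma mrg_tags (ss es : List Int) : ∀ e ∈ mrg ss es, e.2 = 1 ∨ e.2 = -1 := by
  intro e he
  rw [mrg, List.mem_merge] at he
  rcases he with h | h <;> simp [List.mem_map] at h <;> obtain ⟨x, _, hx⟩ := h <;> simp [← hx]

lemma pairwise_mrg (ss es : List Int)
    (hs : ss.Pairwise (· ≤ ·)) (he : es.Pairwise (· ≤ ·)) :
    (mrg ss es).Pairwise (fun a b => evK a ≤ evK b) := by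
  have h := List.pairwise_merge (le := fun a b => decide (evK a ≤ evK b))
    (by intro a b c h1 h2; simp at *; omega)
    (by intro a b; simp [Bool.or_eq_true]; omega)
    (ss.map (fun s => (s, (1 : Int)))) (es.map (fun e => (e, (-1 : Int))))
    (by rw [List.pairwise_map]; exact hs.imp (by intro a b hab; simp [evK]; omega))
    (by rw [List.pairwise_map]; exact he.imp (by intro a b hab; simp [evK]; omega))
  exact h.imp (by intro a b hab; simpa using hab)

lemma sortedK_eq_mrg (xs : List (Int × Int)) :
    PySem.List.sorted (evList xs) evK false
      = mrg (PySem.List.sorted ((xs.filter (fun p => p.1 < p.2)).map (fun p => p.1)) (fun x => x) false)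
            (PySem.List.sorted ((xs.filter (fun p => p.1 < p.2)).map (fun p => p.2)) (fun x => x) false) := by
  set kept := xs.filter (fun p => p.1 < p.2) with hkept
  set SS := PySem.List.sorted (kept.map (fun p => p.1)) (fun x => x) false with hSS
  set EE := PySem.List.sorted (kept.map (fun p => p.2)) (fun x => x) false with hEE
  -- permutation chain
  have p1 : (PySem.List.sorted (evList xs) evK false).Perm (evList xs) := PySem.List.sorted_perm _ _ _
  have p2 : (evList xs).Perm (kept.map (fun p => (p.1, (1 : Int))) ++ kept.map (fun p => (p.2, (-1 : Int)))) := by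
    rw [evList, ← hkept]; exact flat_perm kept
  have pS : (SS.map (fun s => (s, (1 : Int)))).Perm (kept.map (fun p => (p.1, (1 : Int)))) := by
    have := (PySem.List.sorted_perm (kept.map (fun p => p.1)) (fun x => x) false).map (fun s => (s, (1 : Int)))
    simpa [List.map_map, Function.comp] using this
  have pE : (EE.map (fun e => (e, (-1 : Int)))).Perm (kept.map (fun p => (p.2, (-1 : Int)))) := by
    have := (PySem.List.sorted_perm (kept.map (fun p => p.2)) (fun x => x) false).map (fun e => (e, (-1 : Int)))
    simpa [List.map_map, Function.comp] using this
  have p3 : (mrg SS EE).Perm (PySem.List.sorted (evList xs) evK false) := by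
    refine ((List.merge_perm_append _).trans ?_).trans (p1.trans p2).symm
    exact pS.append pE
  -- both pairwise wrt evK ≤, antisymmetric on elements with tag ±1
  have pw1 : (PySem.List.sorted (evList xs) evK false).Pairwise (fun a b => evK a ≤ evK b) :=
    PySem.List.sorted_pairwise _ _
  have pw2 : (mrg SS EE).Pairwise (fun a b => evK a ≤ evK b) :=
    pairwise_mrg _ _ (by simpa using PySem.List.sorted_pairwise (kept.map (fun p => p.1)) (fun x => x))
      (by simpa using PySem.List.sorted_pairwise (kept.map (fun p => p.2)) (fun x => x))
  have t1 : ∀ e ∈ PySem.List.sorted (evList xs) evK false, e.2 = 1 ∨ e.2 = -1 := by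
    intro e he; exact evList_tags xs e ((PySem.List.mem_sorted _ _ _ _).1 he)
  have t2 := mrg_tags SS EE
  refine List.eq_of_perm_of_sorted ?_ pw1 pw2 p3.symm
  intro a b ha hb h1 h2
  have hK : evK a = evK b := le_antisymm h1 h2
  have ta := t1 a ha
  have tb := t2 b hb
  obtain ⟨a1, a2⟩ := a; obtain ⟨b1, b2⟩ := b
  simp only [evK] at hK
  rcases ta with ta | ta <;> rcases tb with tb | tb <;>
    simp_all <;> omega

lemma foldA_ends (es : List Int) (cur best : Int) (h : cur ≤ best) :
    ((es.map (fun e => (e, (-1 : Int)))).foldl fA (cur, best)).2 = best := by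
  induction es generalizing cur best with
  | nil => simp
  | cons e t ih =>
    simp only [List.map_cons, List.foldl_cons, fA]
    rw [if_neg (by omega)]
    exact ih _ _ (by omega)

lemma foldA_mrg (ss : List Int) : ∀ (es : List Int) (cur best : Int), cur ≤ best →
    ((mrg ss es).foldl fA (cur, best)).2 = altSweep ss es cur best := by
  induction ss with
  | nil =>
    intro es cur best h
    simp only [mrg, List.map_nil, List.nil_merge, altSweep]
    exact foldA_ends es cur best h
  | cons s ss ihs =>
    intro es
    induction es with
    | nil =>
      intro cur best h
      simp only [mrg, List.map_nil, List.merge_right, List.map_cons, List.foldl_cons]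
      have : ((ss.map (fun s => (s, (1 : Int)))).foldl fA (fA (cur, best) (s, 1))).2
          = altSweep ss [] (cur + 1) (if best < cur + 1 then cur + 1 else best) := by
        have := ihs [] (cur + 1) (if best < cur + 1 then cur + 1 else best) (by split_ifs <;> omega)
        simpa [mrg, fA] using this
      simpa [fA, altSweep, altDrop] using this
    | cons e es ihe =>
      intro cur best h
      by_cases hse : s < e
      · have : mrg (s :: ss) (e :: es) = (s, 1) :: mrg ss (e :: es) := by
          simp only [mrg, List.map_cons, List.cons_merge_cons]
          rw [if_pos (by simp [evK]; omega)]
        rw [this]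
        simp only [List.foldl_cons, fA]
        have := ihs (e :: es) (cur + 1) (if best < cur + 1 then cur + 1 else best) (by split_ifs <;> omega)
        rw [this]
        simp [altSweep, altDrop, if_neg (by omega : ¬ e ≤ s)]
      · have : mrg (s :: ss) (e :: es) = (e, -1) :: mrg (s :: ss) es := by
          simp only [mrg, List.map_cons, List.cons_merge_cons]
          rw [if_neg (by simp [evK]; omega)]
        rw [this]
        simp only [List.foldl_cons, fA]
        rw [if_neg (by omega : ¬ best < cur + -1), show cur + -1 = cur - 1 from by ring]
        rw [ihe (cur - 1) best (by omega)]
        simp [altSweep, altDrop, if_pos (by omega : e ≤ s)]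

-- ===== VERDICT (by name: the statement is the Claim_ definition above) =====
theorem omega_open_py_spec : Claim_equal_omega_open_py := by
  intro intervals _
  unfold Spec_omega_open_py omega_open_py omega_open_py_alt
  simp only []
  rw [events_foldl_eq, List.nil_append, sorted2_eq_sortedK, sortedK_eq_mrg]
  have := foldA_mrg
    (PySem.List.sorted ((intervals.filter (fun p => p.1 < p.2)).map (fun p => p.1)) (fun x => x) false)
    (PySem.List.sorted ((intervals.filter (fun p => p.1 < p.2)).map (fun p => p.2)) (fun x => x) false)
    0 0 le_rfl
  rw [← this]
  rfl
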